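-- pv_equiv track=rewrite | github.com/prosenjitj/Projects | Puzzles/ConsecutiveSum.py | consecutiveCalc
-- ===== SOURCE A (Python) =====
-- def consecutiveCalc(consecutives , indx , num) :
--     arr = []
--     sum = 0
--     for i in range(indx , len(consecutives)) :
--         sum += consecutives[i]
--         arr.append(consecutives[i])
--         if sum == num :
--             break
--         elif sum > num :
--             break
--
--     return sum , arr
-- ===== SOURCE B (Python) =====
-- def consecutiveCalc(consecutives, indx, num):
--     # Build the prefix-sum table of the tail once, then find the first prefix
--     # reaching num and slice; treats a negative indx as the usual Python tail.
--     elems = consecutives[indx:]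
--     prefix = []
--     s = 0
--     for x in elems:
--         s += x
--         prefix.append(s)
--     for k in range(len(prefix)):
--         if prefix[k] >= num:
--             return prefix[k], elems[:k + 1]
--     return (prefix[-1] if prefix else 0), elems
-- ===== Notes on version B (the rewrite author's own statement) =====
-- stated objective: idiomatic
-- what changed: B builds the prefix-sum table of the Python tail slice consecutives[indx:] once and then scans it for the first prefix reaching num, slicing inclusively, instead of A's single loop over range(indx, len) with in-loop break conditions.
-- intended difference: For -len(consecutives) <= indx < 0 where no prefix of the tail consecutives[indx:] reaches num, A's range(indx, len) wraps around and re-scans the whole list after the tail (e.g. A([5],-1,10)=(10,[5,5])), while B returns the tail's sum and the tail ((5,[5])), which is the intended 'sum consecutive elements from that position' value. — e.g. on consecutiveCalc([5], -1, 10): A returns (10, [5, 5]), B returns (5, [5])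
import Mathlib
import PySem

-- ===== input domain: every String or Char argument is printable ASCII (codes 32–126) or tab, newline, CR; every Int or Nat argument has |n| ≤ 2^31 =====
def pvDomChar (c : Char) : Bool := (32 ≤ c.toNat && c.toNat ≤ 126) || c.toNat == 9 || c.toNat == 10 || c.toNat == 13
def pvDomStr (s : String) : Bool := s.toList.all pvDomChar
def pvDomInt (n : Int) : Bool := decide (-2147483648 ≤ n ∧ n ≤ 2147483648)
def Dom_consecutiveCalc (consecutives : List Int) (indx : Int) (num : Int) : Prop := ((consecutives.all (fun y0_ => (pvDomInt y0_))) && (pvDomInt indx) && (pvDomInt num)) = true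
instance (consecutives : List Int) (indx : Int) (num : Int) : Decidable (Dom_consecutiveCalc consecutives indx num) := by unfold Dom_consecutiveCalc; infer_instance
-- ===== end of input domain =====

-- B replaces A's break-in-loop accumulation by a prefix-sum table plus a first-hit scan and slice
-- (idiomatic decomposition, same cost); on negative indx B reads the Python tail slice where A's
-- range(indx, len) wraps around — stated as the intended difference D_ below.

-- ===== PORT A =====
-- the loop 'for i in range(indx, len(consecutives))' with its two break conditions;
-- pyGetD is exact under Pre_ (outside Pre_ Python raises IndexError)
def consecutiveCalcGo (consecutives : List Int) (num : Int) : List Int → Int → List Int → Int × List Int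
  | [], sum, arr => (sum, arr)
  | i :: rest, sum, arr =>
    let v := PySem.List.pyGetD consecutives i 0
    if sum + v = num then (sum + v, arr ++ [v])
    else if sum + v > num then (sum + v, arr ++ [v])
    else consecutiveCalcGo consecutives num rest (sum + v) (arr ++ [v])

def consecutiveCalc (consecutives : List Int) (indx : Int) (num : Int) : Int × List Int :=
  consecutiveCalcGo consecutives num (PySem.List.pyRange indx (consecutives.length : Int) 1) 0 []

-- ===== PORT B =====
-- 'prefix' table: running sums of elems starting from s
def altPrefix : List Int → Int → List Int
  | [], _ => []
  | x :: xs, s => (s + x) :: altPrefix xs (s + x)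

-- 'for k in range(len(prefix)): if prefix[k] >= num: return prefix[k], elems[:k+1]'
def altFind (elems : List Int) (num : Int) : List Int → Nat → Option (Int × List Int)
  | [], _ => none
  | p :: ps, k => if p ≥ num then some (p, elems.take (k + 1)) else altFind elems num ps (k + 1)

def consecutiveCalc_alt (consecutives : List Int) (indx : Int) (num : Int) : Int × List Int :=
  let elems := PySem.List.slice consecutives (some indx) none
  let pfx := altPrefix elems 0
  match altFind elems num pfx 0 with
  | some r => r
  | none => (pfx.getLast?.getD 0, elems)

-- ===== PRECONDITION & SPEC =====
-- A raises IndexError exactly when indx < -len(consecutives) (the first access wraps out of range)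
def Pre_consecutiveCalc (consecutives : List Int) (indx : Int) (num : Int) : Prop :=
  -(consecutives.length : Int) ≤ indx
instance (consecutives : List Int) (indx : Int) (num : Int) : Decidable (Pre_consecutiveCalc consecutives indx num) := by unfold Pre_consecutiveCalc; infer_instance
def pvWitness_consecutiveCalc : List Int × Int × Int := ([1, 2, 3], 0, 3)

-- For -len ≤ indx < 0 where no prefix sum of the tail consecutives[indx:] reaches num, A's
-- range(indx, len) wraps around and re-scans the whole list after the tail, returning an
-- over-extended sum and array; B returns the tail's sum and the tail, the intended value.
def D_consecutiveCalc (consecutives : List Int) (indx : Int) (num : Int) : Prop :=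
  indx < 0 ∧ -(consecutives.length : Int) ≤ indx ∧
    ∀ p ∈ ((consecutives.drop (((consecutives.length : Int) + indx).toNat)).scanl (· + ·) 0).drop 1,
      p < num
instance (consecutives : List Int) (indx : Int) (num : Int) : Decidable (D_consecutiveCalc consecutives indx num) := by unfold D_consecutiveCalc; infer_instance

def Spec_consecutiveCalc (consecutives : List Int) (indx : Int) (num : Int) (out : Int × List Int) : Prop := ¬ D_consecutiveCalc consecutives indx num → out = consecutiveCalc_alt consecutives indx num
instance (consecutives : List Int) (indx : Int) (num : Int) (out : Int × List Int) : Decidable (Spec_consecutiveCalc consecutives indx num out) := by unfold Spec_consecutiveCalc; infer_instance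

def pvDiffWitness_consecutiveCalc : List Int × Int × Int := ([5], -1, 10)
def pvDiffWitnessOut_consecutiveCalc : (Int × List Int) × (Int × List Int) := ((10, [5, 5]), (5, [5]))

-- ===== CLAIM (what is proved, stated in full; the proofs are below) =====
def Claim_unchanged_consecutiveCalc : Prop := ∀ (consecutives : List Int) (indx : Int) (num : Int), Dom_consecutiveCalc consecutives indx num → Pre_consecutiveCalc consecutives indx num → Spec_consecutiveCalc consecutives indx num (consecutiveCalc consecutives indx num)
def Claim_changed_consecutiveCalc : Prop := Dom_consecutiveCalc (pvDiffWitness_consecutiveCalc.1) (pvDiffWitness_consecutiveCalc.2.1) (pvDiffWitness_consecutiveCalc.2.2) ∧ Pre_consecutiveCalc (pvDiffWitness_consecutiveCalc.1) (pvDiffWitness_consecutiveCalc.2.1) (pvDiffWitness_consecutiveCalc.2.2) ∧ D_consecutiveCalc (pvDiffWitness_consecutiveCalc.1) (pvDiffWitness_consecutiveCalc.2.1) (pvDiffWitness_consecutiveCalc.2.2) ∧ consecutiveCalc (pvDiffWitness_consecutiveCalc.1) (pvDiffWitness_consecutiveCalc.2.1) (pvDiffWitness_consecutiveCalc.2.2)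 = pvDiffWitnessOut_consecutiveCalc.1 ∧ consecutiveCalc_alt (pvDiffWitness_consecutiveCalc.1) (pvDiffWitness_consecutiveCalc.2.1) (pvDiffWitness_consecutiveCalc.2.2) = pvDiffWitnessOut_consecutiveCalc.2 ∧ pvDiffWitnessOut_consecutiveCalc.1 ≠ pvDiffWitnessOut_consecutiveCalc.2
def Claim_exact_consecutiveCalc : Prop := ∀ (consecutives : List Int) (indx : Int) (num : Int), Dom_consecutiveCalc consecutives indx num → Pre_consecutiveCalc consecutives indx num → D_consecutiveCalc consecutives indx num → consecutiveCalc consecutives indx num ≠ consecutiveCalc_alt consecutives indx num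


-- ===== LEMMAS AND PROOFS =====

-- reference recursion both ports reduce to: scan, break at the first running sum ≥ num
def refRun (num : Int) : List Int → Int → Int × List Int
  | [], s => (s, [])
  | v :: rest, s =>
    if num ≤ s + v then (s + v, [v])
    else
      let r := refRun num rest (s + v)
      (r.1, v :: r.2)

theorem go_eq_refRun (c : List Int) (num : Int) (idxs : List Int) :
    ∀ (s : Int) (arr : List Int),
      consecutiveCalcGo c num idxs s arr =
        ((refRun num (idxs.map (fun i => PySem.List.pyGetD c i 0)) s).1,
          arr ++ (refRun num (idxs.map (fun i => PySem.List.pyGetD c i 0)) s).2) := by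
  induction idxs with
  | nil => intro s arr; simp [consecutiveCalcGo, refRun]
  | cons i rest ih =>
    intro s arr
    by_cases h : num ≤ s + PySem.List.pyGetD c i 0
    · have hA : consecutiveCalcGo c num (i :: rest) s arr =
          (s + PySem.List.pyGetD c i 0, arr ++ [PySem.List.pyGetD c i 0]) := by
        by_cases h1 : s + PySem.List.pyGetD c i 0 = num
        · simp [consecutiveCalcGo, h1]
        · have h2 : s + PySem.List.pyGetD c i 0 > num := by omega
          simp [consecutiveCalcGo, h1, h2]
      rw [hA]
      simp [refRun, h]
    · have h1 : ¬ (s + PySem.List.pyGetD c i 0 = num) := by omega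
      have h2 : ¬ (s + PySem.List.pyGetD c i 0 > num) := by omega
      simp only [consecutiveCalcGo, List.map_cons, refRun, if_neg h1, if_neg h2, if_neg h]
      rw [ih]
      simp

theorem cons_getLast_getD (L : List Int) (a b : Int) :
    (a :: L).getLast?.getD b = L.getLast?.getD a := by
  cases L with
  | nil => simp
  | cons x xs =>
    rw [List.getLast?_cons_cons]
    rcases h : (x :: xs).getLast? with _ | y
    · simp [List.getLast?_eq_none_iff] at h
    · simp

theorem altMain (num : Int) : ∀ (elems : List Int) (s : Int) (pre : List Int),
    (match altFind (pre ++ elems) num (altPrefix elems s) pre.length with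
     | some r => r
     | none => ((altPrefix elems s).getLast?.getD s, pre ++ elems))
    = ((refRun num elems s).1, pre ++ (refRun num elems s).2) := by
  intro elems
  induction elems with
  | nil => intro s pre; simp [altPrefix, altFind, refRun]
  | cons v rest ih =>
    intro s pre
    simp only [altPrefix, altFind]
    by_cases h : s + v ≥ num
    · rw [if_pos h]
      simp only [refRun, if_pos (by omega : num ≤ s + v)]
      have : (pre ++ v :: rest).take (pre.length + 1) = pre ++ [v] := by
        have := List.take_length_add_append (l₁ := pre) (l₂ := v :: rest) 1
        simpa using this
      simp [this]
    · rw [if_neg h]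
      have key := ih (s + v) (pre ++ [v])
      simp only [List.append_assoc, List.singleton_append, List.length_append,
        List.length_singleton] at key
      simp only [refRun, if_neg (by omega : ¬ num ≤ s + v)]
      cases hf : altFind (pre ++ v :: rest) num (altPrefix rest (s + v)) (pre.length + 1) with
      | some r =>
        rw [hf] at key
        simpa using key
      | none =>
        rw [hf] at key
        simp only at key
        rw [cons_getLast_getD]
        simpa using key

theorem alt_eq_refRun (c : List Int) (indx num : Int) :
    consecutiveCalc_alt c indx num = refRun num (PySem.List.slice c (some indx) none) 0 := by
  have h := altMain num (PySem.List.slice c (some indx) none) 0 []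
  simpa [consecutiveCalc_alt] using h

theorem A_eq_refRun (c : List Int) (indx num : Int) :
    consecutiveCalc c indx num =
      refRun num ((PySem.List.pyRange indx (c.length : Int) 1).map
        (fun i => PySem.List.pyGetD c i 0)) 0 := by
  have h := go_eq_refRun c num (PySem.List.pyRange indx (c.length : Int) 1) 0 []
  simpa [consecutiveCalc] using h

theorem negmap : ∀ (k : Nat) (c : List Int), k ≤ c.length →
    (PySem.List.pyRange (-(k : Int)) 0 1).map (fun i => PySem.List.pyGetD c i 0) =
      c.drop (c.length - k) := by
  intro k
  induction k with
  | zero =>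
    intro c _
    rw [PySem.List.pyRange_one_eq_nil (by omega)]
    simp
  | succ k ih =>
    intro c h
    rw [PySem.List.pyRange_one_cons (by push_cast; omega)]
    have hstep : -((k : Nat) + 1 : Nat) + 1 = -((k : Nat) : Int) := by push_cast; omega
    rw [List.map_cons, hstep, ih c (by omega)]
    conv_rhs => rw [List.drop_eq_getElem_cons (by omega : c.length - (k + 1) < c.length)]
    have e : c.length - (k + 1) + 1 = c.length - k := by omega
    rw [e]
    congr 1
    simpa using PySem.List.pyGetD_neg_natCast c (k + 1) 0 (by omega) (by omega)

theorem mem_scanl_iff (p : Int) : ∀ (xs : List Int) (s : Int),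
    p ∈ (xs.scanl (· + ·) s).drop 1 ↔ ∃ j < xs.length, p = s + (xs.take (j + 1)).sum := by
  intro xs
  induction xs with
  | nil => intro s; simp [List.scanl]
  | cons v rest ih =>
    intro s
    rw [show (v :: rest).scanl (· + ·) s = s :: rest.scanl (· + ·) (s + v) from by
      simp [List.scanl]]
    have hhead : ∀ (ys : List Int) (a : Int),
        ys.scanl (· + ·) a = a :: (ys.scanl (· + ·) a).drop 1 := by
      intro ys a; cases ys <;> simp [List.scanl]
    simp only [List.drop_one, List.tail_cons]
    constructor
    · intro hp
      rw [hhead rest (s + v)] at hp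
      rcases List.mem_cons.mp hp with h | h
      · exact ⟨0, by simp, by simpa using h⟩
      · obtain ⟨j, hj, hpj⟩ := (ih (s + v)).mp (by simpa [List.drop_one] using h)
        refine ⟨j + 1, by simp; omega, ?_⟩
        simp only [List.take_succ_cons, List.sum_cons]
        omega
    · rintro ⟨j, hj, hpj⟩
      rw [hhead rest (s + v)]
      cases j with
      | zero =>
        simp only [List.take_succ_cons, List.take_zero, List.sum_cons, List.sum_nil] at hpj
        simp [hpj]
      | succ j' =>
        refine List.mem_cons_of_mem _ ?_
        simp only [List.drop_one] at ih ⊢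
        exact (ih (s + v)).mpr ⟨j', by simp at hj; omega,
          by simp only [List.take_succ_cons, List.sum_cons] at hpj; omega⟩

theorem ref_break (num : Int) : ∀ (xs : List Int) (s : Int) (ys : List Int),
    (∃ j < xs.length, num ≤ s + (xs.take (j + 1)).sum) →
    refRun num (xs ++ ys) s = refRun num xs s := by
  intro xs
  induction xs with
  | nil =>
    intro s ys hex
    obtain ⟨j, hj, _⟩ := hex
    simp at hj
  | cons v rest ih =>
    intro s ys hex
    by_cases h : num ≤ s + v
    · simp [refRun, h]
    · obtain ⟨j, hj, hs⟩ := hex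
      cases j with
      | zero => simp at hs; omega
      | succ j' =>
        have hx : num ≤ (s + v) + (rest.take (j' + 1)).sum := by
          simp [List.take_succ_cons] at hs; omega
        simp only [List.cons_append, refRun, if_neg h]
        rw [ih (s + v) ys ⟨j', by simpa using hj, hx⟩]

theorem ref_no_break (num : Int) : ∀ (xs : List Int) (s : Int),
    (∀ j < xs.length, s + (xs.take (j + 1)).sum < num) →
    refRun num xs s = (s + xs.sum, xs) := by
  intro xs
  induction xs with
  | nil => intro s _; simp [refRun]
  | cons v rest ih =>
    intro s hall
    have h0 : s + v < num := by have := hall 0 (by simp); simpa using this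
    have hrest : ∀ j < rest.length, (s + v) + (rest.take (j + 1)).sum < num := by
      intro j hj
      have := hall (j + 1) (by simp; omega)
      simp [List.take_succ_cons] at this
      omega
    simp only [refRun, if_neg (by omega : ¬ num ≤ s + v)]
    rw [ih (s + v) hrest]
    simp only [List.sum_cons, Prod.mk.injEq]
    exact ⟨by ring, trivial⟩

theorem ref_pass (num : Int) : ∀ (xs : List Int) (s : Int) (ys : List Int),
    (∀ j < xs.length, s + (xs.take (j + 1)).sum < num) →
    refRun num (xs ++ ys) s =
      ((refRun num ys (s + xs.sum)).1, xs ++ (refRun num ys (s + xs.sum)).2) := by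
  intro xs
  induction xs with
  | nil => intro s ys _; simp
  | cons v rest ih =>
    intro s ys hall
    have h0 : s + v < num := by have := hall 0 (by simp); simpa using this
    have hrest : ∀ j < rest.length, (s + v) + (rest.take (j + 1)).sum < num := by
      intro j hj
      have := hall (j + 1) (by simp; omega)
      simp [List.take_succ_cons] at this
      omega
    simp only [List.cons_append, refRun, if_neg (by omega : ¬ num ≤ s + v)]
    rw [ih (s + v) ys hrest]
    simp only [List.sum_cons]
    rw [show s + (v + rest.sum) = s + v + rest.sum from by ring]

theorem ref_snd_ne_nil (num : Int) (ys : List Int) (s : Int) (h : ys ≠ []) :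
    (refRun num ys s).2 ≠ [] := by
  cases ys with
  | nil => exact absurd rfl h
  | cons v rest =>
    simp only [refRun]
    split_ifs <;> simp

-- the common reduction for a negative index inside Pre_:
-- A scans tail ++ c, B scans tail, where tail = c.drop ((len + indx).toNat)
theorem A_neg_decomp (c : List Int) (indx num : Int) (hneg : indx < 0)
    (hpre : -(c.length : Int) ≤ indx) :
    consecutiveCalc c indx num =
      refRun num (c.drop (((c.length : Int) + indx).toNat) ++ c) 0 := by
  rw [A_eq_refRun]
  have hsplit := PySem.List.pyRange_one_append indx 0 (c.length : Int)
    (by omega) (by omega)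
  rw [hsplit, List.map_append]
  have hzero : (PySem.List.pyRange 0 (c.length : Int) 1).map
      (fun i => PySem.List.pyGetD c i 0) = c := by
    simpa using PySem.List.map_pyGetD_pyRange' (xs := c) (a := 0) (d := 0) (by omega)
  have hk : (((-indx).toNat : Int)) = -indx := Int.toNat_of_nonneg (by omega)
  have hnegpart : (PySem.List.pyRange indx 0 1).map (fun i => PySem.List.pyGetD c i 0) =
      c.drop (((c.length : Int) + indx).toNat) := by
    have := negmap (-indx).toNat c (by omega)
    rw [hk] at this
    simp only [neg_neg] at this
    rw [this]
    congr 1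
    omega
  rw [hzero, hnegpart]

theorem alt_neg_decomp (c : List Int) (indx num : Int) (hneg : indx < 0)
    (hpre : -(c.length : Int) ≤ indx) :
    consecutiveCalc_alt c indx num =
      refRun num (c.drop (((c.length : Int) + indx).toNat)) 0 := by
  rw [alt_eq_refRun]
  have hk : (((-indx).toNat : Int)) = -indx := Int.toNat_of_nonneg (by omega)
  have hs : PySem.List.slice c (some indx) none =
      c.drop (((c.length : Int) + indx).toNat) := by
    have h1 : PySem.List.slice c (some (-(((-indx).toNat : Nat) : Int))) none =
        c.drop (c.length - (-indx).toNat) :=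
      PySem.List.slice_from_neg_natCast (xs := c) (k := (-indx).toNat) (by omega)
    rw [hk] at h1
    simp only [neg_neg] at h1
    rw [h1]
    congr 1
    omega
  rw [hs]

-- ===== VERDICT (by name: the statement is the Claim_ definition above) =====
theorem consecutiveCalc_spec : Claim_unchanged_consecutiveCalc := by
  intro c indx num _ hpre hnd
  unfold Pre_consecutiveCalc at hpre
  by_cases hge : 0 ≤ indx
  · rw [A_eq_refRun, alt_eq_refRun]
    rw [PySem.List.slice_from c (by omega : (0:Int) ≤ indx)]
    rw [show (PySem.List.pyRange indx (c.length : Int) 1).map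
        (fun i => PySem.List.pyGetD c i 0) = c.drop indx.toNat from
      PySem.List.map_pyGetD_pyRange' (xs := c) (a := indx) (d := 0) hge]
  · have hneg : indx < 0 := by omega
    have hlen : 0 < c.length := by omega
    have hcne : c ≠ [] := by
      cases c with
      | nil => simp at hlen
      | cons a l => simp
    unfold D_consecutiveCalc at hnd
    push_neg at hnd
    obtain ⟨p, hp, hnum⟩ := hnd hneg hpre
    obtain ⟨j, hj, hpj⟩ := (mem_scanl_iff p _ 0).mp hp
    rw [A_neg_decomp c indx num hneg hpre, alt_neg_decomp c indx num hneg hpre]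
    exact ref_break num _ 0 c ⟨j, hj, by omega⟩

theorem consecutiveCalc_tight : Claim_exact_consecutiveCalc := by
  intro c indx num _ hpre hd
  obtain ⟨hneg, hpre', hall⟩ := hd
  have hcne : c ≠ [] := by
    have : 0 < c.length := by omega
    cases c with
    | nil => simp at this
    | cons a l => simp
  rw [A_neg_decomp c indx num hneg hpre', alt_neg_decomp c indx num hneg hpre']
  set tail := c.drop (((c.length : Int) + indx).toNat) with htail
  have hall' : ∀ j < tail.length, (0 : Int) + (tail.take (j + 1)).sum < num := by
    intro j hj
    exact hall (0 + (tail.take (j + 1)).sum) ((mem_scanl_iff _ tail 0).mpr ⟨j, hj, rfl⟩)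
  rw [ref_no_break num tail 0 hall', ref_pass num tail 0 c hall']
  intro heq
  have h2 := congrArg Prod.snd heq
  simp only at h2
  have hlen := congrArg List.length h2
  simp at hlen
  exact ref_snd_ne_nil num c (0 + tail.sum) hcne (by simpa using hlen)

theorem consecutiveCalc_changed : Claim_changed_consecutiveCalc := by
  unfold Claim_changed_consecutiveCalc; decide
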